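-- pv_equiv track=rewrite | github.com/carrdelling/AdventOfCode2015 | day11/silver.py | has_pairs
-- ===== SOURCE A (Python) =====
-- def has_pairs(password):
--
--     idx = 0
--     count = 0
--
--     while idx <= len(password) - 2:
--         if password[idx] == password[idx + 1]:
--             count += 1
--             idx += 2
--
--             if count > 1:
--                 return True
--         else:
--             idx += 1
--     return False
-- ===== SOURCE B (Python) =====
-- def has_pairs(password):
--     # Run-length scan: a maximal run of L equal characters contributes L // 2
--     # non-overlapping pairs; the password has the property iff the total is > 1.
--     count = 0
--     run = 1
--     prev = None
--     for ch in password: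
--         if prev is not None and ch == prev:
--             run += 1
--         else:
--             count += run // 2
--             run = 1
--         prev = ch
--     count += run // 2
--     return count > 1
-- ===== Notes on version B (the rewrite author's own statement) =====
-- stated objective: alternative
-- what changed: Replaces the index loop with skip-by-2 jumps and an early return by a single run-length scan over the characters: each maximal run of L equal characters contributes L//2 non-overlapping pairs, and the total is compared with 1.
import Mathlib
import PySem

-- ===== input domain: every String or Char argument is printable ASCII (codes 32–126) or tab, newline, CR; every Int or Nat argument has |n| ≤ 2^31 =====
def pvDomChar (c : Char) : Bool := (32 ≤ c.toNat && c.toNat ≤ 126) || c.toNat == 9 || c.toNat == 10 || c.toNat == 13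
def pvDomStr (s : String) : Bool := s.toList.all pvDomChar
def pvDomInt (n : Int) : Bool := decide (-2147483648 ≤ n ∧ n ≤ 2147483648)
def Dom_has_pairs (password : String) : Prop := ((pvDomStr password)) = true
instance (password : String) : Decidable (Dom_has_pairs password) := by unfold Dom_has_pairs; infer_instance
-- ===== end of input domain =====

-- B replaces A's index loop (skip-by-2 on a match, early return at the second pair)
-- by a run-length scan: each maximal run of L equal characters contributes L / 2 pairs.

-- ===== PORT A =====
-- A's while loop: idx ranges over positions, condition `idx <= len - 2` is `idx + 2 ≤ len`
-- on naturals (exact for every length, including len < 2 where Python's len-2 is negative).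
def goA (cs : List Char) (idx count : Nat) : Bool :=
  if h : idx + 2 ≤ cs.length then
    if cs[idx]'(by omega) = cs[idx + 1]'(by omega) then
      -- count += 1; if count > 1: return True
      if count + 1 > 1 then true
      else goA cs (idx + 2) (count + 1)
    else goA cs (idx + 1) count
  else false
termination_by cs.length - idx
decreasing_by all_goals omega

def has_pairs (password : String) : Bool :=
  goA password.toList 0 0

-- ===== PORT B =====
-- Source B's loop body: state (count, run, prev)
def stepB (st : Nat × Nat × Option Char) (ch : Char) : Nat × Nat × Option Char :=
  match st with
  | (count, run, prev) =>
    if prev == some ch then (count, run + 1, prev)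
    else (count + run / 2, 1, some ch)

def has_pairs_alt (password : String) : Bool :=
  let st := password.toList.foldl stepB (0, 1, none)
  decide (st.1 + st.2.1 / 2 > 1)

-- ===== PRECONDITION & SPEC =====
def Spec_has_pairs (password : String) (out : Bool) : Prop := out = has_pairs_alt password
instance (password : String) (out : Bool) : Decidable (Spec_has_pairs password out) := by unfold Spec_has_pairs; infer_instance

-- ===== CLAIM (what is proved, stated in full; the proofs are below) =====
def Claim_equal_has_pairs : Prop := ∀ (password : String), Dom_has_pairs password → Spec_has_pairs password (has_pairs password)

-- ===== LEMMAS AND PROOFS =====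

-- the common characterisation: number of non-overlapping adjacent equal pairs, left to right
def pairCount : List Char → Nat
  | c1 :: c2 :: rest => if c1 = c2 then pairCount rest + 1 else pairCount (c2 :: rest)
  | _ => 0

lemma pairCount_short (xs : List Char) (h : xs.length ≤ 1) : pairCount xs = 0 := by
  match xs with
  | [] => rfl
  | [c] => rfl
  | c1 :: c2 :: rest => simp at h

lemma goA_eq (cs : List Char) (idx count : Nat) (hc : count ≤ 1) :
    goA cs idx count = decide (2 ≤ count + pairCount (cs.drop idx)) := by
  fun_induction goA cs idx count with
  | case1 idx count hlen heq hbig =>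
    have hcount : count = 1 := by omega
    have hd : cs.drop idx = cs[idx]'(by omega) :: cs[idx+1]'(by omega) :: cs.drop (idx + 1 + 1) := by
      rw [List.drop_eq_getElem_cons (by omega), List.drop_eq_getElem_cons (by omega)]
    rw [hd]
    simp [pairCount, heq, hcount]
    omega
  | case2 idx count hlen heq hbig ih =>
    have hcount : count = 0 := by omega
    have hd : cs.drop idx = cs[idx]'(by omega) :: cs[idx+1]'(by omega) :: cs.drop (idx + 1 + 1) := by
      rw [List.drop_eq_getElem_cons (by omega), List.drop_eq_getElem_cons (by omega)]
    rw [ih (by omega), hd]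
    simp [pairCount, heq, hcount]
    have h12 : idx + 1 + 1 = idx + 2 := by omega
    rw [h12]
    omega
  | case3 idx count hlen hne ih =>
    have hd : cs.drop idx = cs[idx]'(by omega) :: cs.drop (idx + 1) := by
      rw [List.drop_eq_getElem_cons (by omega)]
    have hd2 : cs.drop (idx + 1) = cs[idx+1]'(by omega) :: cs.drop (idx + 1 + 1) := by
      rw [List.drop_eq_getElem_cons (by omega)]
    rw [ih hc, hd, hd2]
    simp [pairCount, hne]
  | case4 idx count hlen =>
    have : (cs.drop idx).length ≤ 1 := by simp [List.length_drop]; omega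
    rw [pairCount_short _ this]
    simp
    omega

lemma pairCount_replicate (run : Nat) (p : Char) :
    pairCount (List.replicate run p) = run / 2 := by
  induction run using Nat.strong_induction_on with
  | _ run ih =>
    match run with
    | 0 => rfl
    | 1 => rfl
    | n + 2 =>
      simp only [List.replicate_succ]
      simp [pairCount, ih n (by omega)]

lemma pairCount_replicate_append (run : Nat) (p c : Char) (rest : List Char) (hne : p ≠ c) :
    pairCount (List.replicate run p ++ c :: rest) = run / 2 + pairCount (c :: rest) := by
  induction run using Nat.strong_induction_on with
  | _ run ih =>
    match run with
    | 0 => simp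
    | 1 => simp [pairCount, hne]
    | n + 2 =>
      simp only [List.replicate_succ, List.cons_append]
      simp [pairCount, ih n (by omega)]
      omega

lemma foldl_stepB_inv (cs : List Char) (count run : Nat) (p : Char) :
    (cs.foldl stepB (count, run, some p)).1 + (cs.foldl stepB (count, run, some p)).2.1 / 2
      = count + pairCount (List.replicate run p ++ cs) := by
  induction cs generalizing count run p with
  | nil =>
    simp [pairCount_replicate]
  | cons c cs ih =>
    by_cases h : p = c
    · subst h
      have hstep : stepB (count, run, some p) p = (count, run + 1, some p) := by
        simp only [stepB]
        rw [if_pos (by simp)]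
      rw [List.foldl_cons, hstep, ih]
      have : List.replicate run p ++ p :: cs = List.replicate (run + 1) p ++ cs := by
        rw [List.replicate_succ' (n := run)]
        simp
      rw [this]
    · have hstep : stepB (count, run, some p) c = (count + run / 2, 1, some c) := by
        simp only [stepB]
        rw [if_neg (by simp [h])]
      rw [List.foldl_cons, hstep, ih]
      rw [pairCount_replicate_append run p c cs h]
      have : List.replicate 1 c ++ cs = c :: cs := by simp
      rw [this]
      omega

lemma has_pairs_alt_eq (password : String) :
    has_pairs_alt password = decide (2 ≤ pairCount password.toList) := by
  unfold has_pairs_alt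
  match h : password.toList with
  | [] => simp [pairCount]
  | c :: cs =>
    have hstep : stepB (0, 1, none) c = (0 + 1 / 2, 1, some c) := by
      simp only [stepB]
      rw [if_neg (by simp)]
    simp only [List.foldl_cons, hstep]
    have h2 := foldl_stepB_inv cs (0 + 1 / 2) 1 c
    simp only [h2]
    have : List.replicate 1 c ++ cs = c :: cs := by simp
    rw [this]
    have : 0 + 1 / 2 + pairCount (c :: cs) = pairCount (c :: cs) := by omega
    rw [this]
    congr 1

-- ===== VERDICT (by name: the statement is the Claim_ definition above) =====
theorem has_pairs_spec : Claim_equal_has_pairs := by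
  intro password _
  unfold Spec_has_pairs has_pairs
  rw [goA_eq password.toList 0 0 (by omega), has_pairs_alt_eq]
  simp
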